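-- pv_equiv track=rewrite | github.com/daniel-reich/ubiquitous-fiesta | 9fbbjaLt22Zfvjjau_1.py | paul_cipher
-- ===== SOURCE A (Python) =====
-- def paul_cipher(txt):
--     result, previous = '', 0
--     for i in txt.upper():
--         if i.isalpha() and not previous:
--             result += i
--             previous = ord(i) - 64
--         elif i.isalpha() and previous:
--             current = ord(i) - 64
--             result += chr(((previous + current) % 26) + 64)
--             previous = current
--         else:
--             result += i
--     return result
-- ===== SOURCE B (Python) =====
-- def paul_cipher(txt):
--     up = txt.upper()
--     out = list(up)
--     alpha = [(i, ord(c) - 64) for i, c in enumerate(up) if c.isalpha()]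
--     for (_, pv), (j, cv) in zip(alpha, alpha[1:]):
--         out[j] = chr(((pv + cv) % 26) + 64)
--     return ''.join(out)
-- ===== Notes on version B (the rewrite author's own statement) =====
-- stated objective: alternative
-- what changed: Replaces A's single stateful scan (carrying the previous letter value through an accumulator) by a two-phase decomposition: first collect (index, letter-value) pairs of all alphabetic characters, then zip that list with its tail and patch a copy of the uppercased text at each later index.
import Mathlib
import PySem

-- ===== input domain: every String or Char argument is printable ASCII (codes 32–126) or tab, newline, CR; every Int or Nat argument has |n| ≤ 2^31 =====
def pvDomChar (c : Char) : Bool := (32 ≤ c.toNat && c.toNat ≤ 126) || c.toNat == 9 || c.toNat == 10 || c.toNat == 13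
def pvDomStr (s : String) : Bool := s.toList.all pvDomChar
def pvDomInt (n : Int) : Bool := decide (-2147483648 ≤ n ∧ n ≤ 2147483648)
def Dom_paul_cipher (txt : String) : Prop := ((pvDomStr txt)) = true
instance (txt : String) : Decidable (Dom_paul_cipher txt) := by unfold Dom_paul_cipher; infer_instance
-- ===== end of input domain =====

-- B replaces A's stateful scan by a two-phase pass (collect letter (index,value) pairs, then patch a copy at each later index); alternative decomposition, same cost.

-- ===== PORT A =====
-- the body of A's for-loop, one step of the fold over (result, previous)
def pcStepA (st : List Char × Int) (i : Char) : List Char × Int :=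
  if PySem.Chars.isalpha i && (st.2 == 0) then
    (st.1 ++ [i], (i.toNat : Int) - 64)
  else if PySem.Chars.isalpha i && !(st.2 == 0) then
    let current : Int := (i.toNat : Int) - 64
    (st.1 ++ [Char.ofNat (PySem.Int.mod (st.2 + current) 26 + 64).toNat], current)
  else
    (st.1 ++ [i], st.2)

def paul_cipher (txt : String) : String :=
  let st := (PySem.Chars.upper txt.toList).foldl pcStepA ([], 0)
  String.mk st.1

-- ===== PORT B =====
def paul_cipher_alt (txt : String) : String :=
  let up := PySem.Chars.upper txt.toList
  let out := up
  let alpha := (PySem.List.enumerate up 0).filterMap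
    (fun p => if PySem.Chars.isalpha p.2 then some (p.1, (p.2.toNat : Int) - 64) else none)
  let out := (alpha.zip (PySem.List.slice alpha (some 1) none)).foldl
    (fun o pq => o.set pq.2.1.toNat (Char.ofNat (PySem.Int.mod (pq.1.2 + pq.2.2) 26 + 64).toNat)) out
  String.mk out

-- ===== PRECONDITION & SPEC =====
def Spec_paul_cipher (txt : String) (out : String) : Prop := out = paul_cipher_alt txt
instance (txt : String) (out : String) : Decidable (Spec_paul_cipher txt out) := by unfold Spec_paul_cipher; infer_instance

-- ===== CLAIM (what is proved, stated in full; the proofs are below) =====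
def Claim_equal_paul_cipher : Prop := ∀ (txt : String), Dom_paul_cipher txt → Spec_paul_cipher txt (paul_cipher txt)

-- ===== LEMMAS AND PROOFS =====

def pcVal (c : Char) : Int := (c.toNat : Int) - 64

def pcEnc (p v : Int) : Char := Char.ofNat (PySem.Int.mod (p + v) 26 + 64).toNat

/-- Common reference: the cipher as a structural recursion carrying the previous letter value. -/
def pcSpec : List Char → Option Int → List Char
  | [], _ => []
  | c :: cs, p =>
    if PySem.Chars.isalpha c then
      (match p with | none => c | some v => pcEnc v (pcVal c)) :: pcSpec cs (some (pcVal c))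
    else c :: pcSpec cs p

-- A-side
lemma pc_upper_alpha (l : List Char) :
    ∀ c ∈ PySem.Chars.upper l, PySem.Chars.isalpha c = true → 65 ≤ c.toNat := by
  intro c hc ha
  simp [PySem.Chars.upper] at hc
  obtain ⟨x, _, rfl⟩ := hc
  unfold PySem.Chars.upperChar at ha ⊢
  by_cases h : PySem.Chars.islower x = true
  · rw [if_pos h] at ha ⊢
    have hx : 97 ≤ x.toNat ∧ x.toNat ≤ 122 := by
      unfold PySem.Chars.islower at h
      rw [Bool.and_eq_true] at h
      exact ⟨of_decide_eq_true h.1, of_decide_eq_true h.2⟩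
    have hv : Nat.isValidChar (x.toNat - 32) := Or.inl (by omega)
    rw [show (Char.ofNat (x.toNat - 32)).toNat = x.toNat - 32 by simp [Char.ofNat, hv]]
    omega
  · rw [if_neg h] at ha ⊢
    unfold PySem.Chars.isalpha at ha
    rw [Bool.or_eq_true] at ha
    rcases ha with hu | hl
    · unfold PySem.Chars.isupper at hu
      rw [Bool.and_eq_true] at hu
      exact of_decide_eq_true hu.1
    · exact absurd hl h

lemma pc_foldA (cs : List Char) :
    ∀ (res : List Char) (p : Int), (∀ c ∈ cs, PySem.Chars.isalpha c = true → 65 ≤ c.toNat) →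
    (cs.foldl pcStepA (res, p)).1 = res ++ pcSpec cs (if p = 0 then none else some p) := by
  induction cs with
  | nil => intro res p _; simp [pcSpec]
  | cons c cs ih =>
    intro res p h
    have hc := h c (by simp)
    have hcs : ∀ x ∈ cs, PySem.Chars.isalpha x = true → 65 ≤ x.toNat :=
      fun x hx => h x (List.mem_cons_of_mem _ hx)
    rw [List.foldl_cons]
    by_cases ha : PySem.Chars.isalpha c = true
    · have hv : ((c.toNat : Int) - 64) ≠ 0 := by have := hc ha; omega
      by_cases hp : p = 0
      · have hstep : pcStepA (res, p) c = (res ++ [c], (c.toNat : Int) - 64) := by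
          simp [pcStepA, ha, hp]
        rw [hstep, ih _ _ hcs]
        simp [pcSpec, ha, hp, pcVal, hv]
      · have hstep : pcStepA (res, p) c =
            (res ++ [Char.ofNat (PySem.Int.mod (p + ((c.toNat : Int) - 64)) 26 + 64).toNat],
             (c.toNat : Int) - 64) := by
          simp [pcStepA, ha, hp]
        rw [hstep, ih _ _ hcs]
        simp [pcSpec, ha, hp, pcVal, pcEnc, hv]
    · have ha' : PySem.Chars.isalpha c = false := by simpa using ha
      have hstep : pcStepA (res, p) c = (res ++ [c], p) := by simp [pcStepA, ha']
      rw [hstep, ih _ _ hcs]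
      simp [pcSpec, ha']

lemma pc_A_eq_spec (txt : String) :
    paul_cipher txt = String.mk (pcSpec (PySem.Chars.upper txt.toList) none) := by
  unfold paul_cipher
  show String.mk ((PySem.Chars.upper txt.toList).foldl pcStepA ([], 0)).1 = _
  rw [pc_foldA _ [] 0 (pc_upper_alpha _)]
  simp

-- B-side
/-- The (index, value) pairs of the alphabetic characters, indices starting at `s`. -/
def pcAlpha (s : Int) (cs : List Char) : List (Int × Int) :=
  (PySem.List.enumerate cs s).filterMap
    (fun p => if PySem.Chars.isalpha p.2 then some (p.1, pcVal p.2) else none)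

/-- Consecutive pairs of `xs` together with the previous value (`v` before the head). -/
def pcP : Int → List (Int × Int) → List (Int × Int × Int)
  | _, [] => []
  | v, (i, w) :: t => (v, i, w) :: pcP w t

def pcTail : List (Int × Int) → List (Int × Int × Int)
  | [] => []
  | (_, w) :: t => pcP w t

def pcApply (o : List Char) (ts : List (Int × Int × Int)) : List Char :=
  ts.foldl (fun o t => o.set t.2.1.toNat (pcEnc t.1 t.2.2)) o

lemma pc_zip_eq_pcP (xs : List (Int × Int)) :
    ∀ (y : Int × Int) (o : List Char),
    (((y :: xs).zip xs).foldl
      (fun o pq => o.set pq.2.1.toNat (Char.ofNat (PySem.Int.mod (pq.1.2 + pq.2.2) 26 + 64).toNat)) o)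
    = pcApply o (pcP y.2 xs) := by
  induction xs with
  | nil => intro y o; simp [pcApply, pcP]
  | cons z t ih =>
    intro y o
    obtain ⟨i, w⟩ := z
    simp only [List.zip_cons_cons, List.foldl_cons]
    rw [ih (i, w)]
    rfl

lemma pc_enum_shift (cs : List Char) :
    ∀ s : Int, PySem.List.enumerate cs (s + 1) = (PySem.List.enumerate cs s).map (fun p => (p.1 + 1, p.2)) := by
  induction cs with
  | nil => intro s; simp [PySem.List.enumerate_nil]
  | cons c t ih =>
    intro s
    rw [PySem.List.enumerate_cons, PySem.List.enumerate_cons, List.map_cons, ih (s + 1)]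

lemma pc_alpha_shift (cs : List Char) :
    pcAlpha 1 cs = (pcAlpha 0 cs).map (fun p => (p.1 + 1, p.2)) := by
  unfold pcAlpha
  rw [show (1 : Int) = 0 + 1 by norm_num, pc_enum_shift cs 0,
    List.filterMap_map, List.map_filterMap]
  congr 1
  funext p
  by_cases h : PySem.Chars.isalpha p.2 = true <;> simp [h]

lemma pc_alpha_cons_pos (s : Int) (c : Char) (cs : List Char) (h : PySem.Chars.isalpha c = true) :
    pcAlpha s (c :: cs) = (s, pcVal c) :: pcAlpha (s + 1) cs := by
  unfold pcAlpha
  rw [PySem.List.enumerate_cons, List.filterMap_cons]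
  simp [h]

lemma pc_alpha_cons_neg (s : Int) (c : Char) (cs : List Char) (h : PySem.Chars.isalpha c = false) :
    pcAlpha s (c :: cs) = pcAlpha (s + 1) cs := by
  unfold pcAlpha
  rw [PySem.List.enumerate_cons, List.filterMap_cons]
  simp [h]

lemma pc_alpha_nonneg (cs : List Char) : ∀ p ∈ pcAlpha 0 cs, 0 ≤ p.1 := by
  intro p hp
  unfold pcAlpha at hp
  simp only [List.mem_filterMap] at hp
  obtain ⟨q, hq, hq2⟩ := hp
  rw [PySem.List.mem_enumerate_iff] at hq
  obtain ⟨k, hk, hqe⟩ := hq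
  split at hq2
  · cases hq2
    subst hqe
    simp
  · exact absurd hq2 (by simp)

lemma pc_pcP_mem (xs : List (Int × Int)) :
    ∀ (v : Int) (t : Int × Int × Int), t ∈ pcP v xs → (t.2.1, t.2.2) ∈ xs := by
  induction xs with
  | nil => intro v t ht; simp [pcP] at ht
  | cons z r ih =>
    intro v t ht
    obtain ⟨i, w⟩ := z
    simp only [pcP, List.mem_cons] at ht
    rcases ht with rfl | ht
    · simp
    · exact List.mem_cons_of_mem _ (ih w t ht)

lemma pc_pcP_map_shift (xs : List (Int × Int)) :
    ∀ v : Int, pcP v (xs.map (fun p => (p.1 + 1, p.2)))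
      = (pcP v xs).map (fun t => (t.1, t.2.1 + 1, t.2.2)) := by
  induction xs with
  | nil => intro v; simp [pcP]
  | cons z r ih =>
    intro v
    obtain ⟨i, w⟩ := z
    simp only [List.map_cons, pcP, ih w]

lemma pc_apply_shift (ts : List (Int × Int × Int)) :
    ∀ (c : Char) (o : List Char), (∀ t ∈ ts, 0 ≤ t.2.1) →
    pcApply (c :: o) (ts.map (fun t => (t.1, t.2.1 + 1, t.2.2))) = c :: pcApply o ts := by
  induction ts with
  | nil => intro c o _; simp [pcApply]
  | cons t r ih =>
    intro c o h
    have ht : 0 ≤ t.2.1 := h t (by simp)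
    have hset : (t.2.1 + 1).toNat = t.2.1.toNat + 1 := by omega
    simp only [List.map_cons, pcApply, List.foldl_cons, hset, List.set]
    exact ih c _ (fun x hx => h x (by simp [hx]))

lemma pc_apply_shift' (cs : List Char) (c : Char) (o : List Char) (v : Int)
    (h : ∀ p ∈ pcAlpha 0 cs, 0 ≤ p.1) :
    pcApply (c :: o) (pcP v (pcAlpha 1 cs)) = c :: pcApply o (pcP v (pcAlpha 0 cs)) := by
  rw [pc_alpha_shift, pc_pcP_map_shift]
  exact pc_apply_shift _ c o (fun t ht => h _ (pc_pcP_mem _ v t ht))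

lemma pc_B_main (cs : List Char) :
    (∀ v : Int, pcApply cs (pcP v (pcAlpha 0 cs)) = pcSpec cs (some v)) ∧
    pcApply cs (pcTail (pcAlpha 0 cs)) = pcSpec cs none := by
  induction cs with
  | nil => constructor <;> simp [pcAlpha, PySem.List.enumerate_nil, pcP, pcTail, pcApply, pcSpec]
  | cons c cs ih =>
    obtain ⟨ihS, ihN⟩ := ih
    have hnn := pc_alpha_nonneg cs
    by_cases ha : PySem.Chars.isalpha c = true
    · have hcons := pc_alpha_cons_pos 0 c cs ha
      rw [show ((0 : Int) + 1) = 1 by norm_num] at hcons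
      constructor
      · intro v
        rw [hcons]
        simp only [pcP]
        show pcApply (c :: cs) ((v, 0, pcVal c) :: pcP (pcVal c) (pcAlpha 1 cs)) = _
        have h0 : pcApply (c :: cs) ((v, 0, pcVal c) :: pcP (pcVal c) (pcAlpha 1 cs))
            = pcApply (pcEnc v (pcVal c) :: cs) (pcP (pcVal c) (pcAlpha 1 cs)) := by
          simp [pcApply]
        rw [h0, pc_apply_shift' cs _ _ _ hnn, ihS (pcVal c)]
        simp [pcSpec, ha]
      · rw [hcons]
        simp only [pcTail]
        rw [pc_apply_shift' cs _ _ _ hnn, ihS (pcVal c)]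
        simp [pcSpec, ha]
    · have ha' : PySem.Chars.isalpha c = false := by simpa using ha
      have hcons := pc_alpha_cons_neg 0 c cs ha'
      rw [show ((0 : Int) + 1) = 1 by norm_num] at hcons
      constructor
      · intro v
        rw [hcons, pc_apply_shift' cs _ _ _ hnn, ihS v]
        simp [pcSpec, ha']
      · rw [hcons, pc_alpha_shift]
        cases hA : pcAlpha 0 cs with
        | nil =>
          have h := ihN
          rw [hA] at h
          simp only [pcTail, pcApply, List.foldl_nil] at h
          simp [pcTail, pcApply, pcSpec, ha', ← h]
        | cons z t =>
          obtain ⟨i, w⟩ := z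
          simp only [List.map_cons, pcTail]
          rw [pc_pcP_map_shift]
          rw [pc_apply_shift _ c cs (fun x hx => by
            have := pc_pcP_mem t w x hx
            exact hnn _ (by rw [hA]; exact List.mem_cons_of_mem _ this))]
          have hN : pcApply cs (pcP w t) = pcSpec cs none := by
            rw [← ihN, hA]; rfl
          rw [hN]
          simp [pcSpec, ha']

lemma pc_B_eq_spec (txt : String) :
    paul_cipher_alt txt = String.mk (pcSpec (PySem.Chars.upper txt.toList) none) := by
  unfold paul_cipher_alt
  have hsl : ∀ (xs : List (Int × Int)), PySem.List.slice xs (some 1) none = xs.tail := by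
    intro xs
    rw [show ((1 : Int) = ((1 : Nat) : Int)) by norm_num, PySem.List.slice_from]
    · simp [List.drop_one]
    · norm_num
  simp only [hsl]
  set up := PySem.Chars.upper txt.toList with hup
  have halpha : (PySem.List.enumerate up 0).filterMap
      (fun p => if PySem.Chars.isalpha p.2 then some (p.1, (p.2.toNat : Int) - 64) else none)
      = pcAlpha 0 up := rfl
  rw [halpha]
  cases hA : pcAlpha 0 up with
  | nil =>
    have h := (pc_B_main up).2
    rw [hA] at h
    simpa [pcApply, pcTail] using congrArg String.mk h
  | cons y xs =>
    simp only [List.tail_cons]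
    rw [pc_zip_eq_pcP xs y up]
    have hT : pcP y.2 xs = pcTail (pcAlpha 0 up) := by rw [hA]; obtain ⟨i, w⟩ := y; rfl
    rw [hT]
    exact congrArg String.mk (pc_B_main up).2

-- ===== VERDICT (by name: the statement is the Claim_ definition above) =====
theorem paul_cipher_spec : Claim_equal_paul_cipher := by
  intro txt _
  unfold Spec_paul_cipher
  rw [pc_A_eq_spec, pc_B_eq_spec]
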